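-- pv_equiv track=rewrite | github.com/ctigaret/scipyen | core/desktoputils.py | removeReducedCJKAccMark
-- ===== SOURCE A (Python) =====
-- def removeReducedCJKAccMark(label:str, pos:int):
--     # NOTE: 2023-05-06 18:06:09
--     # from ki18n frameworks i18n common_helpers.cpp
--     # https://invent.kde.org/frameworks/ki18n/-/blob/master/src/i18n/common_helpers.cpp
--     if pos > 0 and pos + 1 < len(label) and label[pos-1] == '(' and label[pos+1] == ')' and label[pos].isalnum():
--         length = len(label)
--         p1 = pos-2
--
--         while p1 >= 0 and not label[p1].isalnum():
--             p1 -= 1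
--
--         p1 += 1
--
--         p2 = pos + 2
--
--         while p2 < length and not label[p2].isalnum():
--             p2 += 1
--
--         p2 -= 1
--
--         if p1 == 0:
--             return label[0:(pos-1)] + label[(p2+1):]
--         elif p2 + 1 == length:
--             return label[0:p1] + label[(pos+2):]
--
--     return label
-- ===== SOURCE B (Python) =====
-- def removeReducedCJKAccMark(label: str, pos: int):
--     # Build the global list of alphanumeric positions once; the decision is then a
--     # neighbour lookup of pos in that list (no directional cursor walking).
--     n = len(label)
--     if not (0 < pos < n - 1 and label[pos-1] == '(' and label[pos+1] == ')' and label[pos].isalnum()):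
--         return label
--     idx = [i for i, c in enumerate(label) if c.isalnum()]
--     k = idx.index(pos)
--     if k == 0:
--         hi = idx[1] if len(idx) > 1 else n
--         return label[:pos-1] + label[hi:]
--     if k == len(idx) - 1:
--         return label[:idx[k-1]+1] + label[pos+2:]
--     return label
-- ===== Notes on version B (the rewrite author's own statement) =====
-- stated objective: alternative
-- what changed: A walks two cursors outward from the mark with while loops; B instead builds the global list of alphanumeric positions once and decides everything by looking up pos's neighbours in that list (k==0 / k==last), with no directional scanning.
import Mathlib
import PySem

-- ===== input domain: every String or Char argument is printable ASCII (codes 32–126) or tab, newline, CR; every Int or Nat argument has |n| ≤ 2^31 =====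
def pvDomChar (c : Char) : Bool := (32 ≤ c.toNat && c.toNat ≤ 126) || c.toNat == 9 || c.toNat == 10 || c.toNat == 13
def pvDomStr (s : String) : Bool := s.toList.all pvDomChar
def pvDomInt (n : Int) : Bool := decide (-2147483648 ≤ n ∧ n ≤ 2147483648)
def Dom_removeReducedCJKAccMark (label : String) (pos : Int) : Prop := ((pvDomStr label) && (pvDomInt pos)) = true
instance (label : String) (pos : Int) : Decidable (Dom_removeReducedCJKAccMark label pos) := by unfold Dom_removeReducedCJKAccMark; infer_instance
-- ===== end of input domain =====

-- B replaces A's two outward-walking cursor loops by one global list of the alphanumeric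
-- positions and a neighbour lookup of pos in it (objective: alternative algorithm, same cost).

-- ===== PORT A =====
-- label[i].isalnum() at an Int index (A only reads it at in-range indices)
def pvAlnumAt (cs : List Char) (i : Int) : Bool :=
  match PySem.List.pyGet? cs i with
  | some c => PySem.Chars.isalnum c
  | none => false

-- 'while p1 >= 0 and not label[p1].isalnum(): p1 -= 1'
def pvLoopDown (cs : List Char) (p1 : Int) : Int :=
  if 0 ≤ p1 ∧ ¬ pvAlnumAt cs p1 then pvLoopDown cs (p1 - 1) else p1
termination_by (p1 + 1).toNat
decreasing_by omega

-- 'while p2 < length and not label[p2].isalnum(): p2 += 1'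
def pvLoopUp (cs : List Char) (p2 : Int) : Int :=
  if p2 < (cs.length : Int) ∧ ¬ pvAlnumAt cs p2 then pvLoopUp cs (p2 + 1) else p2
termination_by ((cs.length : Int) - p2).toNat
decreasing_by omega

def removeReducedCJKAccMark (label : String) (pos : Int) : String :=
  let cs := label.toList
  if pos > 0 ∧ pos + 1 < (cs.length : Int)
      ∧ PySem.List.pyGet? cs (pos - 1) = some '(' ∧ PySem.List.pyGet? cs (pos + 1) = some ')'
      ∧ pvAlnumAt cs pos then
    let length : Int := cs.length
    let p1 := pvLoopDown cs (pos - 2) + 1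
    let p2 := pvLoopUp cs (pos + 2) - 1
    if p1 = 0 then
      String.ofList (PySem.List.slice cs (some 0) (some (pos - 1)) ++ PySem.List.slice cs (some (p2 + 1)) none)
    else if p2 + 1 = length then
      String.ofList (PySem.List.slice cs (some 0) (some p1) ++ PySem.List.slice cs (some (pos + 2)) none)
    else label
  else label

-- ===== PORT B =====
-- '[i for i, c in enumerate(label) if c.isalnum()]'
def pvIdx (cs : List Char) : List Int :=
  ((PySem.List.enumerate cs).filter (fun p => PySem.Chars.isalnum p.2)).map (·.1)

def removeReducedCJKAccMark_alt (label : String) (pos : Int) : String :=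
  let cs := label.toList
  let n : Int := cs.length
  if ¬ (0 < pos ∧ pos < n - 1
      ∧ PySem.List.pyGet? cs (pos - 1) = some '(' ∧ PySem.List.pyGet? cs (pos + 1) = some ')'
      ∧ pvAlnumAt cs pos = true) then
    label
  else
    let idx := pvIdx cs
    match PySem.List.index? idx pos with
    | none => label  -- unreachable: pos is alphanumeric, hence pos ∈ idx (Python's .index cannot raise here)
    | some k =>
      if k = 0 then
        -- 'hi = idx[1] if len(idx) > 1 else n'
        let hi : Int := idx.getD 1 n
        String.ofList (PySem.List.slice cs none (some (pos - 1)) ++ PySem.List.slice cs (some hi) none)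
      else if k = idx.length - 1 then
        -- idx[k-1] is in range here (k ≥ 1)
        String.ofList (PySem.List.slice cs none (some (idx.getD (k - 1) 0 + 1)) ++ PySem.List.slice cs (some (pos + 2)) none)
      else label

-- ===== PRECONDITION & SPEC =====
def Spec_removeReducedCJKAccMark (label : String) (pos : Int) (out : String) : Prop := out = removeReducedCJKAccMark_alt label pos
instance (label : String) (pos : Int) (out : String) : Decidable (Spec_removeReducedCJKAccMark label pos out) := by unfold Spec_removeReducedCJKAccMark; infer_instance

-- ===== CLAIM (what is proved, stated in full; the proofs are below) =====
def Claim_equal_removeReducedCJKAccMark : Prop := ∀ (label : String) (pos : Int), Dom_removeReducedCJKAccMark label pos → Spec_removeReducedCJKAccMark label pos (removeReducedCJKAccMark label pos)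

-- ===== LEMMAS AND PROOFS =====

theorem pv_alnumAt_eq (cs : List Char) (i : Int) (h : 0 ≤ i) :
    pvAlnumAt cs i = ((cs[i.toNat]?.map PySem.Chars.isalnum).getD false) := by
  unfold pvAlnumAt
  simp only [PySem.List.pyGet?_of_nonneg cs h]
  cases cs[i.toNat]? <;> simp

-- what pvLoopDown computes, by properties
theorem pv_down_spec (cs : List Char) (p : Int) (hp : -1 ≤ p) :
    -1 ≤ pvLoopDown cs p ∧ pvLoopDown cs p ≤ p ∧
    (∀ i, pvLoopDown cs p < i → i ≤ p → ¬ pvAlnumAt cs i) ∧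
    (pvLoopDown cs p = -1 ∨ pvAlnumAt cs (pvLoopDown cs p)) := by
  induction p using pvLoopDown.induct cs with
  | case1 p h ih =>
      rw [pvLoopDown, if_pos h]
      obtain ⟨r1, r2, r3, r4⟩ := ih (by omega)
      refine ⟨r1, by omega, ?_, r4⟩
      intro i hi1 hi2
      by_cases he : i = p
      · subst he; exact h.2
      · exact r3 i hi1 (by omega)
  | case2 p h =>
      rw [pvLoopDown, if_neg h]
      refine ⟨hp, le_refl _, by omega, ?_⟩
      by_cases h0 : 0 ≤ p
      · right; by_contra hq; exact h ⟨h0, hq⟩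
      · left; omega

-- what pvLoopUp computes, by properties
theorem pv_up_spec (cs : List Char) (p : Int) (hp : p ≤ (cs.length : Int)) :
    p ≤ pvLoopUp cs p ∧ pvLoopUp cs p ≤ (cs.length : Int) ∧
    (∀ i, p ≤ i → i < pvLoopUp cs p → ¬ pvAlnumAt cs i) ∧
    (pvLoopUp cs p = (cs.length : Int) ∨ pvAlnumAt cs (pvLoopUp cs p)) := by
  induction p using pvLoopUp.induct cs with
  | case1 p h ih =>
      rw [pvLoopUp, if_pos h]
      obtain ⟨r1, r2, r3, r4⟩ := ih (by omega)
      refine ⟨by omega, r2, ?_, r4⟩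
      intro i hi1 hi2
      by_cases he : i = p
      · subst he; exact h.2
      · exact r3 i (by omega) hi2
  | case2 p h =>
      rw [pvLoopUp, if_neg h]
      refine ⟨le_refl _, hp, by omega, ?_⟩
      by_cases h0 : p < (cs.length : Int)
      · right; by_contra hq; exact h ⟨h0, hq⟩
      · left; omega

-- (i, c) ∈ enumerate bs s, characterised by indexing
theorem pv_mem_enum (bs : List Char) (s i : Int) (c : Char) :
    (i, c) ∈ PySem.List.enumerate bs s ↔ 0 ≤ i - s ∧ bs[(i - s).toNat]? = some c := by
  induction bs generalizing s with
  | nil => simp [PySem.List.enumerate_nil]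
  | cons b t ih =>
      rw [PySem.List.enumerate_cons]
      simp only [List.mem_cons, ih (s+1), Prod.mk.injEq]
      constructor
      · rintro (⟨rfl, rfl⟩ | ⟨h1, h2⟩)
        · simp
        · have : (i - s).toNat = (i - (s+1)).toNat + 1 := by omega
          rw [this]; exact ⟨by omega, by simpa using h2⟩
      · rintro ⟨h1, h2⟩
        by_cases hi : i = s
        · subst hi; simp at h2; left; exact ⟨rfl, h2.symm⟩
        · right
          have : (i - s).toNat = (i - (s+1)).toNat + 1 := by omega
          rw [this] at h2; simp at h2
          exact ⟨by omega, h2⟩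

-- membership in the alnum-position list
theorem pv_mem_idx (cs : List Char) (i : Int) :
    i ∈ pvIdx cs ↔ 0 ≤ i ∧ pvAlnumAt cs i = true := by
  unfold pvIdx
  simp only [List.mem_map, List.mem_filter]
  constructor
  · rintro ⟨⟨i', c⟩, ⟨hm, hq⟩, rfl⟩
    rw [pv_mem_enum] at hm
    simp only [sub_zero] at hm
    refine ⟨hm.1, ?_⟩
    rw [pv_alnumAt_eq cs i' hm.1, hm.2]
    simpa using hq
  · rintro ⟨h0, hq⟩
    rw [pv_alnumAt_eq cs i h0] at hq
    cases hc : cs[i.toNat]? with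
    | none => rw [hc] at hq; simp at hq
    | some c =>
        rw [hc] at hq; simp at hq
        exact ⟨(i, c), ⟨(pv_mem_enum cs 0 i c).2 (by simpa using ⟨h0, hc⟩), by simpa using hq⟩, rfl⟩

-- every recorded position is in range
theorem pv_idx_lt_len (cs : List Char) (i : Int) (h : i ∈ pvIdx cs) : i < (cs.length : Int) := by
  obtain ⟨h0, hq⟩ := (pv_mem_idx cs i).1 h
  rw [pv_alnumAt_eq cs i h0] at hq
  by_contra hge
  rw [List.getElem?_eq_none (by omega)] at hq
  simp at hq

-- the position list is strictly increasing
theorem pv_idx_sorted (cs : List Char) : (pvIdx cs).Pairwise (· < ·) := by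
  unfold pvIdx
  rw [List.pairwise_map]
  exact (PySem.List.pairwise_lt_enumerate cs 0).filter _

-- ===== VERDICT (by name: the statement is the Claim_ definition above) =====
theorem removeReducedCJKAccMark_spec : Claim_equal_removeReducedCJKAccMark := by
  intro label pos _
  unfold Spec_removeReducedCJKAccMark removeReducedCJKAccMark removeReducedCJKAccMark_alt
  set cs := label.toList with hcs
  set n : Int := (cs.length : Int) with hn
  by_cases hg : pos > 0 ∧ pos + 1 < n
      ∧ PySem.List.pyGet? cs (pos - 1) = some '(' ∧ PySem.List.pyGet? cs (pos + 1) = some ')'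
      ∧ pvAlnumAt cs pos = true
  case neg =>
    rw [if_neg hg, if_pos (by intro hno; obtain ⟨ha, hb, hc, hd, he⟩ := hno
                              exact hg ⟨by omega, by omega, hc, hd, he⟩)]
  case pos =>
  obtain ⟨h1, h2, h3, h4, h5⟩ := hg
  rw [if_pos ⟨h1, h2, h3, h4, h5⟩,
      if_neg (show ¬ ¬ (0 < pos ∧ pos < n - 1 ∧ _ ∧ _ ∧ _) from
        not_not.2 ⟨by omega, by omega, h3, h4, h5⟩)]
  -- facts about the mark's neighbours
  have hparL : pvAlnumAt cs (pos - 1) = false := by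
    unfold pvAlnumAt; rw [h3]; decide
  have hparR : pvAlnumAt cs (pos + 1) = false := by
    unfold pvAlnumAt; rw [h4]; decide
  set idx := pvIdx cs with hidx
  have hmono : ∀ (j1 j2 : Nat) (h1 : j1 < idx.length) (h2 : j2 < idx.length),
      j1 < j2 → idx[j1] < idx[j2] := by
    intro j1 j2 hj1 hj2 hlt
    exact List.pairwise_iff_getElem.1 (pv_idx_sorted cs) j1 j2 hj1 hj2 hlt
  have hmem_ex : ∀ i : Int, 0 ≤ i → pvAlnumAt cs i = true →
      ∃ (j : Nat) (hj : j < idx.length), idx[j] = i := by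
    intro i h0 ha
    have := (pv_mem_idx cs i).2 ⟨h0, ha⟩
    obtain ⟨j, hj, he⟩ := List.mem_iff_getElem.1 this
    exact ⟨j, hj, he⟩
  have hposmem : pos ∈ idx := (pv_mem_idx cs pos).2 ⟨by omega, h5⟩
  cases hik : PySem.List.index? idx pos with
  | none =>
      exact absurd ((PySem.List.index?_isSome_iff (xs := idx) (v := pos)).2 hposmem)
        (by rw [hik]; simp)
  | some k =>
  obtain ⟨hk, hke, _⟩ := PySem.List.getElem_of_index?_eq_some hik
  -- loop characterisations
  obtain ⟨d1, d2, d3, d4⟩ := pv_down_spec cs (pos - 2) (by omega)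
  obtain ⟨u1, u2, u3, u4⟩ := pv_up_spec cs (pos + 2) (by omega)
  set d := pvLoopDown cs (pos - 2) with hd
  set u := pvLoopUp cs (pos + 2) with hu
  have harith : u - 1 + 1 = u := by ring
  simp only [hik]
  rw [harith]
  by_cases hk0 : k = 0
  · -- no alphanumeric character before the mark
    subst hk0
    have hd1 : d = -1 := by
      by_contra hne
      have hal : pvAlnumAt cs d = true := by
        rcases d4 with h | h
        · omega
        · exact h
      have h0 : 0 ≤ d := by
        by_contra hneg
        have : d = -1 := by omega
        exact hne this
      obtain ⟨j, hj, he⟩ := hmem_ex d h0 hal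
      rcases Nat.eq_zero_or_pos j with hj0 | hjpos
      · subst hj0; rw [hke] at he; omega
      · have := hmono 0 j hk hj hjpos
        rw [hke] at this; omega
    rw [if_pos (show d + 1 = 0 by omega), if_pos rfl]
    -- u equals B's hi
    have hhi : idx.getD 1 n = u := by
      rw [List.getD_eq_getElem?_getD]
      by_cases hlen : 1 < idx.length
      · rw [List.getElem?_eq_getElem hlen]
        simp only [Option.getD_some]
        set m := idx[1] with hm
        have hmmem : m ∈ idx := List.getElem_mem _
        obtain ⟨hm0, hmal⟩ := (pv_mem_idx cs m).1 hmmem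
        have hmlt : m < n := pv_idx_lt_len cs m hmmem
        have hmgt : pos < m := by have := hmono 0 1 hk hlen (by omega); rw [hke] at this; omega
        have hm2 : pos + 2 ≤ m := by
          by_contra hc
          have : m = pos + 1 := by omega
          rw [this, hparR] at hmal; simp at hmal
        have hum : u ≤ m := by
          by_contra hc
          exact absurd hmal (by simpa using u3 m hm2 (by omega))
        have hmu : m ≤ u := by
          by_contra hc
          have hual : pvAlnumAt cs u = true := by
            rcases u4 with h | h
            · omega
            · exact h
          obtain ⟨j, hj, he⟩ := hmem_ex u (by omega) hual
          rcases Nat.eq_zero_or_pos j with hj0 | hjpos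
          · subst hj0; rw [hke] at he; omega
          · have : idx[1] ≤ idx[j] := by
              rcases Nat.lt_or_ge 1 j with h | h
              · exact le_of_lt (hmono 1 j hlen hj h)
              · have : j = 1 := by omega
                subst this; exact le_refl _
            rw [he, ← hm] at this; omega
        omega
      · rw [List.getElem?_eq_none (by omega)]
        simp only [Option.getD_none]
        rcases u4 with h | h
        · omega
        · obtain ⟨j, hj, he⟩ := hmem_ex u (by omega) h
          have : j = 0 := by omega
          subst this; rw [hke] at he; omega
    rw [hhi, PySem.List.slice_zero_start]
  · -- there is an alphanumeric character before the mark
    rw [if_neg hk0]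
    have hkpos : 0 < k := Nat.pos_of_ne_zero hk0
    set prev := idx[k-1]'(by omega) with hprev
    have hprevmem : prev ∈ idx := List.getElem_mem _
    obtain ⟨hp0, hpal⟩ := (pv_mem_idx cs prev).1 hprevmem
    have hprevlt : prev < pos := by
      have := hmono (k-1) k (by omega) hk (by omega); rw [hke] at this; omega
    have hprev2 : prev ≤ pos - 2 := by
      by_contra hc
      have : prev = pos - 1 := by omega
      rw [this, hparL] at hpal; simp at hpal
    -- A's downward loop lands exactly on prev
    have hdprev : d = prev := by
      have hge : prev ≤ d := by
        by_contra hc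
        exact absurd hpal (by simpa using d3 prev (by omega) hprev2)
      have hle : d ≤ prev := by
        by_contra hc
        have hal : pvAlnumAt cs d = true := by
          rcases d4 with h | h
          · omega
          · exact h
        obtain ⟨j, hj, he⟩ := hmem_ex d (by omega) hal
        have hjgt : k - 1 < j := by
          by_contra hjle
          have : idx[j] ≤ prev := by
            rcases Nat.lt_or_ge j (k-1) with h | h
            · exact le_of_lt (hmono j (k-1) hj (by omega) h)
            · have : j = k - 1 := by omega
              subst this; exact le_refl _
          omega
        have hjk : k ≤ j := by omega
        have : pos ≤ idx[j] := by
          rcases Nat.lt_or_ge k j with h | h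
          · have := hmono k j hk hj h; rw [hke] at this; omega
          · have : j = k := by omega
            subst this; rw [hke]
        omega
      omega
    rw [if_neg (show ¬ d + 1 = 0 by omega)]
    by_cases hklast : k = idx.length - 1
    · -- no alphanumeric character after the mark
      have hun : u = n := by
        rcases u4 with h | h
        · omega
        · obtain ⟨j, hj, he⟩ := hmem_ex u (by omega) h
          have : idx[j] ≤ pos := by
            rcases Nat.lt_or_ge j k with hlt | hge
            · have := hmono j k hj hk hlt; rw [hke] at this; omega
            · have : j = k := by omega
              subst this; rw [hke]
          omega
      rw [if_pos hun, if_pos hklast]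
      have : idx.getD (k-1) 0 = prev := by
        rw [List.getD_eq_getElem?_getD, List.getElem?_eq_getElem (by omega)]
        simp [hprev]
      rw [this, hdprev, PySem.List.slice_zero_start]
    · -- alphanumerics on both sides: nothing changes
      have hklt : k + 1 < idx.length := by omega
      set nxt := idx[k+1] with hnxt
      have hnxtmem : nxt ∈ idx := List.getElem_mem _
      obtain ⟨hn0, hnal⟩ := (pv_mem_idx cs nxt).1 hnxtmem
      have hnxtlt : nxt < n := pv_idx_lt_len cs nxt hnxtmem
      have hnxtgt : pos < nxt := by
        have := hmono k (k+1) hk hklt (by omega); rw [hke] at this; omega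
      have hnxt2 : pos + 2 ≤ nxt := by
        by_contra hc
        have : nxt = pos + 1 := by omega
        rw [this, hparR] at hnal; simp at hnal
      have hune : ¬ u = n := by
        intro hun
        exact absurd hnal (by simpa using u3 nxt hnxt2 (by omega))
      rw [if_neg hune, if_neg hklast]
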